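-- pv_equiv track=rewrite | github.com/authentic-cloud/AI-powered-Tic-tac-toe | tictactoe.py | checkfirstplay
-- ===== SOURCE A (Python) =====
-- def checkfirstplay(board,player):
--     count = 0
--     for row in range(len(board)):
--         for col in range(len(board[row])):
--             if row == col and board[row][col] == player:
--                 count += 1
--     if count == 3:
--         return True
--     else:
--         return False
-- ===== SOURCE B (Python) =====
-- def checkfirstplay(board, player):
--     # count matches along the main diagonal only, guarding ragged rows
--     return sum(1 for i in range(len(board)) if i < len(board[i]) and board[i][i] == player) == 3
-- ===== Notes on version B (the rewrite author's own statement) =====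
-- stated objective: alternative
-- what changed: B walks only the main-diagonal indices once (with a ragged-row bound guard) and compares the diagonal match count to 3, instead of scanning every cell of every row with a nested loop.
import Mathlib
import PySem

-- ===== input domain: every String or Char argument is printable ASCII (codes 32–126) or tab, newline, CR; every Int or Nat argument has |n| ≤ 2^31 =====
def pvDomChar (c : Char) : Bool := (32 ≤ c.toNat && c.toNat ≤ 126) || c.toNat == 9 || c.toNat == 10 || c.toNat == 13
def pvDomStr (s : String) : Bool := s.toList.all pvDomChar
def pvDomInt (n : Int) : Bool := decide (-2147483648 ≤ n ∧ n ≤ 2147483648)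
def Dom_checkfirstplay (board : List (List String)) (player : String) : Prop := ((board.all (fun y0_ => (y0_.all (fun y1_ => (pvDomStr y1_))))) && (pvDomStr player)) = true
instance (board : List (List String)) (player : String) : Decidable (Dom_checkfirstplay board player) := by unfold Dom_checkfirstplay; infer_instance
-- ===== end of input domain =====

-- ===== PORT A =====
def checkfirstplay (board : List (List String)) (player : String) : Bool :=
  let count := (List.range board.length).foldl (fun c row =>
    (List.range ((board.getD row []).length)).foldl (fun c2 col =>
      if row == col && (board.getD row []).getD col "" == player then c2 + 1 else c2) c) 0
  if count == 3 then true else false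

-- ===== PORT B =====
def checkfirstplay_alt (board : List (List String)) (player : String) : Bool :=
  ((List.range board.length).countP
    (fun i => decide (i < (board.getD i []).length) && ((board.getD i []).getD i "" == player))) == 3

-- ===== PRECONDITION & SPEC =====
def Spec_checkfirstplay (board : List (List String)) (player : String) (out : Bool) : Prop := out = checkfirstplay_alt board player
instance (board : List (List String)) (player : String) (out : Bool) : Decidable (Spec_checkfirstplay board player out) := by unfold Spec_checkfirstplay; infer_instance

-- ===== CLAIM (what is proved, stated in full; the proofs are below) =====
def Claim_equal_checkfirstplay : Prop := ∀ (board : List (List String)) (player : String), Dom_checkfirstplay board player → Spec_checkfirstplay board player (checkfirstplay board player)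

-- ===== LEMMAS AND PROOFS =====

-- ===== VERDICT (by name: the statement is the Claim_ definition above) =====
-- inner row scan adds 1 exactly when the diagonal index lies in the row and matches
theorem pv_inner (row : Nat) (Q : Nat → Bool) (m c : Nat) :
    (List.range m).foldl (fun c2 col => if row == col && Q col then c2 + 1 else c2) c
      = c + (if row < m ∧ Q row = true then 1 else 0) := by
  induction m generalizing c with
  | zero => simp
  | succ m ih =>
    rw [List.range_succ, List.foldl_append, ih]
    simp only [List.foldl_cons, List.foldl_nil]
    by_cases hq : Q row = true
    · by_cases h : row = m
      · subst h; simp [hq]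
      · by_cases h2 : row < m <;> simp [h, hq, h2, Nat.lt_succ_iff_lt_or_eq] <;> omega
    · by_cases h : row = m
      · subst h; simp [hq]
      · simp [h, hq]

theorem pv_outer (g : Nat → Nat) (Q : Nat → Nat → Bool) (n c : Nat) :
    (List.range n).foldl (fun c row =>
      (List.range (g row)).foldl (fun c2 col => if row == col && Q row col then c2 + 1 else c2) c) c
      = c + (List.range n).countP (fun i => decide (i < g i) && Q i i) := by
  induction n generalizing c with
  | zero => simp
  | succ n ih =>
    rw [List.range_succ, List.foldl_append, List.countP_append]
    simp only [List.foldl_cons, List.foldl_nil, List.countP_cons]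
    rw [pv_inner, ih]
    by_cases h : n < g n <;> by_cases hq : Q n n = true <;> simp [h, hq] <;> omega

theorem checkfirstplay_spec : Claim_equal_checkfirstplay := by
  intro board player _
  unfold Spec_checkfirstplay checkfirstplay checkfirstplay_alt
  rw [pv_outer (fun row => (board.getD row []).length) (fun row col => (board.getD row []).getD col "" == player)]
  cases h : List.countP (fun i => decide (i < (List.getD board i []).length) && (List.getD (List.getD board i []) i "" == player)) (List.range board.length) == 3 <;> simp_all
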